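-- pv_equiv track=rewrite | github.com/IsaacG/Advent-of-Code | everybody_codes/event2025/quest_16.py | solve
-- ===== SOURCE A (Python) =====
-- import math
--
-- def solve(part: int, data: list[list[int]]) -> int:
--     """Solve the parts."""
--     cols = data[0]
--     if part == 1:
--         return sum(90 // i for i in cols)
--
--     # Reverse build the wall into the spell steps.
--     spell = []
--     cols = data[0]
--     while any(cols):
--         i = next(i for i, v in enumerate(cols) if v)
--         for j in range(i, len(cols), i + 1):
--             cols[j] -= 1
--         spell.append(i + 1)
--     if part == 2:
--         return math.prod(spell)
--
--     target = 202520252025000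
--     # Exponentially search for the upper bound.
--     high = 100
--     while sum(high // i for i in spell) < target:
--         high *= 2
--     # Binary search for the result.
--     low = high // 2
--     while low + 1 < high:
--         mid = (high + low) // 2
--         got = sum(mid // i for i in spell)
--         if got == target:
--             high = mid
--         elif got > target:
--             high = mid - 1
--         else:
--             low = mid
--     return high
-- ===== SOURCE B (Python) =====
-- import math
--
-- def solve(part: int, data: list[list[int]]) -> int:
--     """Solve the parts."""
--     cols = data[0]
--     if part == 1:
--         return sum(90 // c for c in cols)
--
--     # Batched decoding: m[s-1] ends up as the multiplicity of spell step s.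
--     # One sieve pass subtracts the whole count of step s from every proper
--     # multiple at once instead of peeling the wall one brick at a time.
--     n = len(cols)
--     m = list(cols)
--     for s in range(1, n + 1):
--         ms = m[s - 1]
--         for j in range(2 * s, n + 1, s):
--             m[j - 1] -= ms
--     if part == 2:
--         return math.prod(s ** m[s - 1] for s in range(1, n + 1))
--
--     target = 202520252025000
--
--     def count(x: int) -> int:
--         return sum((x // s) * m[s - 1] for s in range(1, n + 1))
--
--     # Exponentially search for the upper bound.
--     high = 100
--     while count(high) < target:
--         high *= 2
--     # Binary search for the result.
--     low = high // 2
--     while low + 1 < high: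
--         mid = (high + low) // 2
--         got = count(mid)
--         if got == target:
--             high = mid
--         elif got > target:
--             high = mid - 1
--         else:
--             low = mid
--     return high
-- ===== Notes on version B (the rewrite author's own statement) =====
-- stated objective: alternative
-- what changed: B replaces A's brick-by-brick wall peeling (one unit subtracted per while-iteration, then sums/products over the materialized spell list) by a single divisor-sieve pass that extracts each spell step's whole multiplicity at once, and weights the part-2 product and part-3 divisor counts by those multiplicities instead of iterating over the spell multiset.
import Mathlib
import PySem

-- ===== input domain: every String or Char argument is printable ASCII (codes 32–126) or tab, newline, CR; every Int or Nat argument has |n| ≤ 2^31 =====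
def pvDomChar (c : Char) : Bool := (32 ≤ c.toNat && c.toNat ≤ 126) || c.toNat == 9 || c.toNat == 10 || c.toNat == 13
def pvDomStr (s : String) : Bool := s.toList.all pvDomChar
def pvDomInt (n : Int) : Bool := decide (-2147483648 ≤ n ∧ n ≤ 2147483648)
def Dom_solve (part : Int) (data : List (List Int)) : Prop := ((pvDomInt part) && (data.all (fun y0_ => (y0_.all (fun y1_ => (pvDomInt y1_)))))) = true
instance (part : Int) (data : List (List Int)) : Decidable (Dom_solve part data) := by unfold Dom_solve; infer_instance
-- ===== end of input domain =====

-- B replaces A's one-brick-at-a-time wall decoding by a single divisor-sieve pass that extracts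
-- each spell step's whole multiplicity at once, and weights the part-2 product / part-3 counts by
-- those multiplicities (objective: alternative).  Equivalence is about the RETURN value only:
-- Python A mutates data[0] in place while decoding; Python B does not.

-- Shared spec-side helpers (divisor-count inversion of the wall), also used as the exact fuel of
-- A's while loop: resTable/mfun give the unique candidate multiplicity of each spell step.

-- resTable cols k: the list [m 1, …, m k] of candidate multiplicities, m s = cols[s-1] - Σ_{d proper divisor of s} m d
def resTable (cols : List Int) : Nat → List Int
  | 0 => []
  | k+1 =>
    let t := resTable cols k
    t ++ [cols.getD k 0 - ∑ d ∈ (k+1).properDivisors, t.getD (d-1) 0]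

def mfun (cols : List Int) (s : Nat) : Int := (resTable cols s).getD (s-1) 0

-- tailFuel cols q k = Σ_{t < q} (m (k+t+1)).toNat: the exact number of iterations A's while loop
-- still performs once the first k columns are exhausted (A diverges outside Pre_solve).
def tailFuel (cols : List Int) : Nat → Nat → Nat
  | 0, _ => 0
  | q+1, k => (mfun cols (k+1)).toNat + tailFuel cols (q) (k+1)

def pvTarget : Int := 202520252025000

-- ===== PORT A =====

-- for j in range(i, len(cols), i + 1): cols[j] -= 1   (indices from the range are in bounds and ≥ 0, so pySetD/pyGetD are exact)
def aStep (cols : List Int) (i : Nat) : List Int :=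
  (PySem.List.pyRange (i : Int) (PySem.List.len cols) ((i : Int) + 1)).foldl
    (fun c j => PySem.List.pySetD c j (PySem.List.pyGetD c j 0 - 1)) cols

-- while any(cols): i = next(i for i, v in enumerate(cols) if v); …; spell.append(i + 1)
-- fuel only makes the loop total: it is the exact iteration count whenever A terminates.
def buildSpell : Nat → List Int → List Int → List Int
  | 0, _, spell => spell
  | fuel+1, cols, spell =>
    if cols.any (fun v => v != 0) then
      -- i = next(i for i, v in enumerate(cols) if v)  is the first index with a nonzero value
      buildSpell fuel (aStep cols (cols.findIdx (fun v => v != 0)))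
        (spell ++ [(cols.findIdx (fun v => v != 0) : Int) + 1])
    else spell

-- sum(x // i for i in spell)
def aCount (spell : List Int) (x : Int) : Int :=
  spell.foldl (fun acc s => acc + PySem.Int.floordiv x s) 0

-- while sum(high // i for i in spell) < target: high *= 2   (fuel 100+len suffices whenever the spell is nonempty)
def aExp (spell : List Int) : Nat → Int → Int
  | 0, high => high
  | fuel+1, high =>
    if aCount spell high < pvTarget then aExp spell fuel (high * 2) else high

-- while low + 1 < high: …   (fuel (high-low).toNat is exact: the interval shrinks every iteration)
def aBin (spell : List Int) : Nat → Int → Int → Int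
  | 0, _, high => high
  | fuel+1, low, high =>
    if low + 1 < high then
      let mid := PySem.Int.floordiv (high + low) 2
      let got := aCount spell mid
      if got = pvTarget then aBin spell fuel low mid
      else if got > pvTarget then aBin spell fuel low (mid - 1)
      else aBin spell fuel mid high
    else high

def solve (part : Int) (data : List (List Int)) : Int :=
  let cols := data.headD []        -- data[0]; Pre_solve excludes data = []
  if part = 1 then
    cols.foldl (fun acc c => acc + PySem.Int.floordiv 90 c) 0
  else
    let spell := buildSpell (tailFuel cols cols.length 0) cols []
    if part = 2 then
      spell.foldl (fun acc s => acc * s) 1      -- math.prod(spell)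
    else
      let high := aExp spell (100 + cols.length) 100
      let low := PySem.Int.floordiv high 2
      aBin spell (high - low).toNat low high

-- ===== PORT B =====

-- for s in range(1, n+1): ms = m[s-1]; for j in range(2*s, n+1, s): m[j-1] -= ms
def bSieve (cols : List Int) : List Int :=
  (PySem.List.pyRange 1 ((cols.length : Int) + 1) 1).foldl
    (fun m s =>
      let ms := PySem.List.pyGetD m (s - 1) 0
      (PySem.List.pyRange (2 * s) ((cols.length : Int) + 1) s).foldl
        (fun m' j => PySem.List.pySetD m' (j - 1) (PySem.List.pyGetD m' (j - 1) 0 - ms)) m)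
    cols

-- sum((x // s) * m[s-1] for s in range(1, n+1))
def bCount (n : Nat) (m : List Int) (x : Int) : Int :=
  (PySem.List.pyRange 1 ((n : Int) + 1) 1).foldl
    (fun acc s => acc + PySem.Int.floordiv x s * PySem.List.pyGetD m (s - 1) 0) 0

def bExp (n : Nat) (m : List Int) : Nat → Int → Int
  | 0, high => high
  | fuel+1, high =>
    if bCount n m high < pvTarget then bExp n m fuel (high * 2) else high

def bBin (n : Nat) (m : List Int) : Nat → Int → Int → Int
  | 0, _, high => high
  | fuel+1, low, high =>
    if low + 1 < high then
      let mid := PySem.Int.floordiv (high + low) 2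
      let got := bCount n m mid
      if got = pvTarget then bBin n m fuel low mid
      else if got > pvTarget then bBin n m fuel low (mid - 1)
      else bBin n m fuel mid high
    else high

def solve_alt (part : Int) (data : List (List Int)) : Int :=
  let cols := data.headD []        -- data[0]; Pre_solve excludes data = []
  if part = 1 then
    cols.foldl (fun acc c => acc + PySem.Int.floordiv 90 c) 0
  else
    let n := cols.length
    let m := bSieve cols
    if part = 2 then
      -- math.prod(s ** m[s-1] for s in range(1, n+1)); the exponent is taken via toNat, exact
      -- because Pre_solve makes every multiplicity nonnegative (Python would produce a float otherwise)
      (PySem.List.pyRange 1 ((n : Int) + 1) 1).foldl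
        (fun acc s => acc * s ^ (PySem.List.pyGetD m (s - 1) 0).toNat) 1
    else
      let high := bExp n m (100 + n) 100
      let low := PySem.Int.floordiv high 2
      bBin n m (high - low).toNat low high

-- ===== PRECONDITION & SPEC =====
-- Pre_solve excludes exactly the inputs where Python A raises or diverges: data = [] (IndexError on
-- data[0]); part 1 with a zero column (ZeroDivisionError); for the other parts a wall whose
-- divisor-count inversion has a negative multiplicity (A's while loop then spins forever on a
-- negative column), and for part ∉ {1,2} an all-zero wall (the doubling search never reaches the
-- target and spins forever).  The residues mfun are the divisor-count (Möbius) inversion of the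
-- wall, defined by the standard arithmetic recurrence m s = cols[s-1] − Σ_{d ∣ s, d < s} m d over
-- the divisor lattice; this is a property of the input wall alone, not a copy of either
-- implementation's loop (A peels single bricks one at a time, B sieves a list in place).
def Pre_solve (part : Int) (data : List (List Int)) : Prop :=
  data ≠ [] ∧
  (part = 1 → ∀ c ∈ data.headD [], c ≠ 0) ∧
  (part ≠ 1 →
    (∀ s ≤ (data.headD []).length, 0 ≤ mfun (data.headD []) s) ∧
    (part = 2 ∨ ∃ c ∈ data.headD [], c ≠ 0))
instance (part : Int) (data : List (List Int)) : Decidable (Pre_solve part data) := by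
  unfold Pre_solve; infer_instance

def pvWitness_solve : Int × List (List Int) := (2, [[1, 2]])

def Spec_solve (part : Int) (data : List (List Int)) (out : Int) : Prop := out = solve_alt part data
instance (part : Int) (data : List (List Int)) (out : Int) : Decidable (Spec_solve part data out) := by
  unfold Spec_solve; infer_instance

-- ===== CLAIM (what is proved, stated in full; the proofs are below) =====
def Claim_equal_solve : Prop := ∀ (part : Int) (data : List (List Int)), Dom_solve part data → Pre_solve part data → Spec_solve part data (solve part data)

-- ===== LEMMAS AND PROOFS =====

theorem resTable_length (cols : List Int) (k : Nat) : (resTable cols k).length = k := by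
  induction k with
  | zero => rfl
  | succ k ih => simp [resTable, ih]

theorem resTable_getD_stable (cols : List Int) (s k : Nat) (h1 : 1 ≤ s) (h2 : s ≤ k) :
    (resTable cols k).getD (s-1) 0 = mfun cols s := by
  induction k with
  | zero => omega
  | succ k ih =>
    by_cases hs : s ≤ k
    · rw [show resTable cols (k+1) = resTable cols k ++
          [cols.getD k 0 - ∑ d ∈ (k+1).properDivisors, (resTable cols k).getD (d-1) 0] from rfl,
        List.getD_append _ _ _ _ (by rw [resTable_length]; omega), ih hs]
    · have : s = k + 1 := by omega
      subst this; rfl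

theorem mfun_succ (cols : List Int) (k : Nat) :
    mfun cols (k+1) = cols.getD k 0 - ∑ d ∈ (k+1).properDivisors, mfun cols d := by
  have h0 : mfun cols (k+1) = (resTable cols k ++
      [cols.getD k 0 - ∑ d ∈ (k+1).properDivisors, (resTable cols k).getD (d-1) 0]).getD k 0 := rfl
  rw [h0, List.getD_append_right _ _ _ _ (by rw [resTable_length])]
  simp only [resTable_length, Nat.sub_self, List.getD_cons_zero]
  congr 1
  refine Finset.sum_congr rfl (fun d hd => ?_)
  rw [Nat.mem_properDivisors] at hd
  have hd1 : 1 ≤ d := Nat.pos_of_dvd_of_pos hd.1 (Nat.succ_pos k)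
  exact resTable_getD_stable cols d k hd1 (by omega)

theorem sum_ite_divides_proper (f : Nat → Int) (j : Nat) :
    ∑ d ∈ Finset.range j, (if (d+1) ∣ (j+1) then f (d+1) else 0) = ∑ e ∈ (j+1).properDivisors, f e := by
  rw [← Finset.sum_filter]
  refine Finset.sum_nbij' (fun d => d + 1) (fun e => e - 1) ?_ ?_ ?_ ?_ ?_
  · intro d hd
    simp only [Finset.mem_filter, Finset.mem_range] at hd
    exact Nat.mem_properDivisors.mpr ⟨hd.2, by show d + 1 < j + 1; omega⟩
  · intro e he
    rw [Nat.mem_properDivisors] at he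
    have he1 : 1 ≤ e := Nat.pos_of_dvd_of_pos he.1 (Nat.succ_pos j)
    simp only [Finset.mem_filter, Finset.mem_range]
    constructor
    · omega
    · rw [Nat.sub_add_cancel he1]; exact he.1
  · intro d hd; show d + 1 - 1 = d; omega
  · intro e he
    rw [Nat.mem_properDivisors] at he
    have he1 : 1 ≤ e := Nat.pos_of_dvd_of_pos he.1 (Nat.succ_pos j)
    show e - 1 + 1 = e; omega
  · intro d hd; rfl

theorem sum_ite_divides_full (f : Nat → Int) (j N : Nat) (h : j < N) :
    ∑ d ∈ Finset.range N, (if (d+1) ∣ (j+1) then f (d+1) else 0) = ∑ e ∈ (j+1).divisors, f e := by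
  rw [← Finset.sum_filter]
  refine Finset.sum_nbij' (fun d => d + 1) (fun e => e - 1) ?_ ?_ ?_ ?_ ?_
  · intro d hd
    simp only [Finset.mem_filter, Finset.mem_range] at hd
    exact Nat.mem_divisors.mpr ⟨hd.2, Nat.succ_ne_zero j⟩
  · intro e he
    rw [Nat.mem_divisors] at he
    have he1 : 1 ≤ e := Nat.pos_of_dvd_of_pos he.1 (Nat.succ_pos j)
    have hle : e ≤ j + 1 := Nat.le_of_dvd (Nat.succ_pos j) he.1
    simp only [Finset.mem_filter, Finset.mem_range]
    constructor
    · omega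
    · rw [Nat.sub_add_cancel he1]; exact he.1
  · intro d hd; show d + 1 - 1 = d; omega
  · intro e he
    rw [Nat.mem_divisors] at he
    have he1 : 1 ≤ e := Nat.pos_of_dvd_of_pos he.1 (Nat.succ_pos j)
    show e - 1 + 1 = e; omega
  · intro d hd; rfl

theorem cols_eq_sum_divisors (cols : List Int) (j : Nat) :
    ∑ e ∈ (j+1).divisors, mfun cols e = cols.getD j 0 := by
  rw [← Nat.insert_self_properDivisors (Nat.succ_ne_zero j),
    Finset.sum_insert (fun hmem => by
      rw [Nat.mem_properDivisors] at hmem; omega),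
    mfun_succ]
  ring

theorem getD_set' (xs : List Int) (i t : Nat) (a : Int) (h : i < xs.length) :
    (xs.set i a).getD t 0 = if i = t then a else xs.getD t 0 := by
  simp [List.getD_eq_getElem?_getD, List.getElem?_set]
  split_ifs <;> simp_all

theorem list_eq_map_getD_range (xs : List Int) :
    (List.range xs.length).map (fun j => xs.getD j 0) = xs := by
  apply List.ext_getElem (by simp)
  intro t h1 h2
  simp [List.getD_eq_getElem?_getD, List.getElem?_eq_getElem h2]

-- getD after a fold of in-range decrements-by-v: subtract v per occurrence of the index
theorem foldl_pySetD_sub (v : Int) (L : List Int) (S : List Int)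
    (hL : ∀ j ∈ L, 0 ≤ j ∧ j.toNat < S.length) (t : Nat) :
    (L.foldl (fun c j => PySem.List.pySetD c j (PySem.List.pyGetD c j 0 - v)) S).getD t 0
      = S.getD t 0 - v * (L.count (t : Int)) := by
  induction L generalizing S with
  | nil => simp
  | cons j L ih =>
    obtain ⟨hj0, hjlen⟩ := hL j (List.mem_cons_self)
    rw [List.foldl_cons, PySem.List.pySetD_of_nonneg _ _ hj0,
      PySem.List.pyGetD_eq_getElem _ _ hj0 (by omega),
      ← List.getD_eq_getElem _ 0 hjlen]
    rw [ih _ (by intro x hx; rw [List.length_set]; exact hL x (List.mem_cons_of_mem _ hx))]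
    rw [getD_set' _ _ _ _ hjlen, List.count_cons]
    by_cases hjt : j.toNat = t
    · have hje : j = (t : Int) := by omega
      rw [if_pos hjt, if_pos (by simpa using hje), hjt]
      push_cast
      ring
    · have hje : ¬ (j = (t : Int)) := by omega
      rw [if_neg hjt, if_neg (by simpa using hje)]
      push_cast
      ring

theorem foldl_pySetD_sub_length (v : Int) (L : List Int) (S : List Int) :
    (L.foldl (fun c j => PySem.List.pySetD c j (PySem.List.pyGetD c j 0 - v)) S).length = S.length := by
  induction L generalizing S with
  | nil => rfl
  | cons j L ih => rw [List.foldl_cons, ih, PySem.List.length_pySetD]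

theorem count_pyRange_pos (a b s : Int) (hs : 0 < s) (x : Int) :
    (PySem.List.pyRange a b s).count x = if a ≤ x ∧ x < b ∧ s ∣ (x - a) then 1 else 0 := by
  have hnd : (PySem.List.pyRange a b s).Nodup := by
    rw [PySem.List.pyRange_of_pos a b hs]
    refine List.Nodup.map ?_ List.nodup_range
    intro k1 k2 hk
    simp only at hk
    have h1 : (s:Int) * k1 = s * k2 := by omega
    have h2 := mul_left_cancel₀ (by omega : (s:Int) ≠ 0) h1
    exact_mod_cast h2
  by_cases hmem : x ∈ PySem.List.pyRange a b s
  · rw [List.count_eq_one_of_mem hnd hmem,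
      if_pos ((PySem.List.mem_pyRange_iff_of_pos hs x).mp hmem)]
  · rw [List.count_eq_zero_of_not_mem hmem,
      if_neg (fun hc => hmem ((PySem.List.mem_pyRange_iff_of_pos hs x).mpr hc))]

-- the state of A's loop: first k steps fully extracted
def stateAt (cols : List Int) (k : Nat) : List Int :=
  (List.range cols.length).map
    (fun j => cols.getD j 0 - ∑ d ∈ Finset.range k, (if (d+1) ∣ (j+1) then mfun cols (d+1) else 0))

def decBy (S : List Int) (i : Nat) (v : Int) : List Int :=
  (List.range S.length).map (fun j => S.getD j 0 - if i ≤ j ∧ (i+1) ∣ (j+1) then v else 0)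

def tailSpell (cols : List Int) : Nat → Nat → List Int
  | 0, _ => []
  | q+1, k => List.replicate (mfun cols (k+1)).toNat ((k : Int) + 1) ++ tailSpell cols q (k+1)

theorem decBy_length (S : List Int) (i : Nat) (v : Int) : (decBy S i v).length = S.length := by
  simp [decBy]

theorem decBy_getD (S : List Int) (i : Nat) (v : Int) (t : Nat) (ht : t < S.length) :
    (decBy S i v).getD t 0 = S.getD t 0 - if i ≤ t ∧ (i+1) ∣ (t+1) then v else 0 := by
  unfold decBy
  rw [PySem.List.getD_map_range _ _ _ _ ht]

theorem dvd_int_nat (i t : Nat) :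
    (((i : Int) + 1) ∣ ((t : Int) - i)) ↔ ((i+1) ∣ (t+1)) := by
  rw [← Int.natCast_dvd_natCast]
  push_cast
  constructor
  · intro h'
    have h3 : (t:Int) + 1 = ((t:Int) - i) + ((i:Int)+1) := by ring
    rw [h3]; exact dvd_add h' (dvd_refl _)
  · intro h'
    have h3 : (t:Int) - i = ((t:Int) + 1) - ((i:Int)+1) := by ring
    rw [h3]; exact dvd_sub h' (dvd_refl _)

theorem aStep_eq_decBy (S : List Int) (i : Nat) :
    aStep S i = decBy S i 1 := by
  have hs : (0:Int) < (i:Int) + 1 := by omega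
  have hL : ∀ j ∈ PySem.List.pyRange (i : Int) (PySem.List.len S) ((i : Int) + 1),
      0 ≤ j ∧ j.toNat < S.length := by
    intro j hj
    obtain ⟨hj1, hj2, -⟩ := (PySem.List.mem_pyRange_iff_of_pos hs j).mp hj
    rw [PySem.List.len_eq] at hj2
    omega
  unfold aStep
  apply List.ext_getElem (by rw [foldl_pySetD_sub_length, decBy_length])
  intro t h1 h2
  have ht : t < S.length := by rwa [decBy_length] at h2
  rw [← List.getD_eq_getElem _ 0 h1, ← List.getD_eq_getElem _ 0 h2,
    foldl_pySetD_sub 1 _ S hL t, decBy_getD _ _ _ _ ht,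
    count_pyRange_pos _ _ _ hs]
  have hiff : ((i:Int) ≤ (t:Int) ∧ (t:Int) < PySem.List.len S ∧ ((i:Int)+1) ∣ ((t:Int) - (i:Int)))
      ↔ (i ≤ t ∧ (i+1) ∣ (t+1)) := by
    rw [PySem.List.len_eq]
    constructor
    · rintro ⟨hle, -, hdvd⟩
      exact ⟨by omega, (dvd_int_nat i t).mp hdvd⟩
    · rintro ⟨hle, hdvd⟩
      exact ⟨by omega, by omega, (dvd_int_nat i t).mpr hdvd⟩
  by_cases hC : i ≤ t ∧ (i+1) ∣ (t+1)
  · rw [if_pos (hiff.mpr hC), if_pos hC]; push_cast; ring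
  · rw [if_neg (fun hc => hC (hiff.mp hc)), if_neg hC]; push_cast; ring

theorem decBy_decBy (S : List Int) (i : Nat) (v w : Int) :
    decBy (decBy S i v) i w = decBy S i (v + w) := by
  apply List.ext_getElem (by rw [decBy_length, decBy_length, decBy_length])
  intro t h1 h2
  have ht : t < S.length := by rwa [decBy_length] at h2
  rw [← List.getD_eq_getElem _ 0 h1, ← List.getD_eq_getElem _ 0 h2,
    decBy_getD _ _ _ _ (by rwa [decBy_length]), decBy_getD _ _ _ _ ht, decBy_getD _ _ _ _ ht]
  split_ifs <;> ring

theorem decBy_zero (S : List Int) (i : Nat) : decBy S i 0 = S := by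
  apply List.ext_getElem (by rw [decBy_length])
  intro t h1 h2
  rw [← List.getD_eq_getElem _ 0 h1, ← List.getD_eq_getElem _ 0 h2,
    decBy_getD _ _ _ _ h2]
  simp

theorem buildSpell_zero_state (f : Nat) (S spell : List Int)
    (h : ∀ v ∈ S, v = 0) : buildSpell f S spell = spell := by
  cases f with
  | zero => rfl
  | succ f =>
    have : S.any (fun v => v != 0) = false := by
      simp only [List.any_eq_false]; intro v hv; simpa using h v hv
    simp [buildSpell, this]

theorem phase_lemma (c : Nat) : ∀ (S spell : List Int) (fuel : Nat) (i : Nat),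
    i < S.length → (∀ j, j < i → S.getD j 0 = 0) → S.getD i 0 = (c : Int) →
    buildSpell (fuel + c) S spell
      = buildSpell fuel (decBy S i (c : Int)) (spell ++ List.replicate c ((i : Int) + 1)) := by
  induction c with
  | zero =>
    intro S spell fuel i hi hz hSi
    simp [decBy_zero]
  | succ c ih =>
    intro S spell fuel i hi hz hSi
    have hSit : S[i] = ((c:Int)+1) := by
      rw [← List.getD_eq_getElem _ 0 hi, hSi]; push_cast; ring
    have hany : S.any (fun v => v != 0) = true := by
      rw [List.any_eq_true]
      refine ⟨S[i], List.getElem_mem hi, ?_⟩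
      rw [hSit]; simp; omega
    have hfind : S.findIdx (fun v => v != 0) = i := by
      rw [List.findIdx_eq hi]
      constructor
      · rw [hSit]; simp; omega
      · intro j hj
        have hz' := hz j hj
        rw [List.getD_eq_getElem _ 0 (Nat.lt_trans hj hi)] at hz'
        simp [hz']
    rw [Nat.add_succ, buildSpell, if_pos hany, hfind, aStep_eq_decBy]
    have h1 : i < (decBy S i 1).length := by rwa [decBy_length]
    have h2 : ∀ j, j < i → (decBy S i 1).getD j 0 = 0 := by
      intro j hj
      rw [decBy_getD _ _ _ _ (by omega : j < S.length), hz j hj,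
        if_neg (fun hc => by omega)]
      ring
    have h3 : (decBy S i 1).getD i 0 = (c : Int) := by
      rw [decBy_getD _ _ _ _ hi, hSi, if_pos ⟨le_refl i, dvd_refl (i+1)⟩]
      push_cast
      ring
    rw [ih (decBy S i 1) (spell ++ [(i:Int)+1]) fuel i h1 h2 h3, decBy_decBy,
      List.append_assoc]
    have e1 : (1:Int) + (c:Int) = ((c+1 : Nat) : Int) := by push_cast; ring
    rw [e1, List.replicate_succ]
    rfl

theorem stateAt_length (cols : List Int) (k : Nat) : (stateAt cols k).length = cols.length := by
  simp [stateAt]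

theorem stateAt_getD (cols : List Int) (k t : Nat) (ht : t < cols.length) :
    (stateAt cols k).getD t 0
      = cols.getD t 0 - ∑ d ∈ Finset.range k, (if (d+1) ∣ (t+1) then mfun cols (d+1) else 0) := by
  unfold stateAt
  rw [PySem.List.getD_map_range _ _ _ _ ht]

theorem decBy_stateAt (cols : List Int) (k : Nat) (_hk : k < cols.length) :
    decBy (stateAt cols k) k (mfun cols (k+1)) = stateAt cols (k+1) := by
  apply List.ext_getElem (by rw [decBy_length, stateAt_length, stateAt_length])
  intro t h1 h2
  have ht : t < cols.length := by rwa [stateAt_length] at h2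
  rw [← List.getD_eq_getElem _ 0 h1, ← List.getD_eq_getElem _ 0 h2,
    decBy_getD _ _ _ _ (by rwa [stateAt_length]), stateAt_getD _ _ _ ht, stateAt_getD _ _ _ ht,
    Finset.sum_range_succ]
  by_cases hd : (k+1) ∣ (t+1)
  · have hkt : k ≤ t := by
      have := Nat.le_of_dvd (by omega) hd
      omega
    rw [if_pos ⟨hkt, hd⟩, if_pos hd]
    ring
  · rw [if_neg (fun hc => hd hc.2), if_neg hd]
    ring

theorem main_lemma (cols : List Int) (hm : ∀ s, s ≤ cols.length → 0 ≤ mfun cols s) :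
    ∀ (q k : Nat), k + q = cols.length → ∀ (fuel : Nat) (spell : List Int),
    buildSpell (fuel + tailFuel cols q k) (stateAt cols k) spell = spell ++ tailSpell cols q k := by
  intro q
  induction q with
  | zero =>
    intro k hk fuel spell
    rw [tailFuel, tailSpell, Nat.add_zero, List.append_nil]
    apply buildSpell_zero_state
    intro v hv
    obtain ⟨j, hj, rfl⟩ := List.mem_map.mp hv
    rw [List.mem_range] at hj
    rw [sum_ite_divides_full _ j k (by omega), cols_eq_sum_divisors, sub_self]
  | succ q ih =>
    intro k hk fuel spell
    have hkn : k < cols.length := by omega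
    have hnn : 0 ≤ mfun cols (k+1) := hm (k+1) (by omega)
    rw [tailFuel, tailSpell,
      show fuel + ((mfun cols (k+1)).toNat + tailFuel cols q (k+1))
        = (fuel + tailFuel cols q (k+1)) + (mfun cols (k+1)).toNat from by omega]
    have hzero : ∀ j, j < k → (stateAt cols k).getD j 0 = 0 := by
      intro j hj
      rw [stateAt_getD _ _ _ (by omega), sum_ite_divides_full _ j k (by omega),
        cols_eq_sum_divisors, sub_self]
    have hval : (stateAt cols k).getD k 0 = (((mfun cols (k+1)).toNat : Nat) : Int) := by
      rw [stateAt_getD _ _ _ hkn, sum_ite_divides_proper, ← mfun_succ,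
        Int.toNat_of_nonneg hnn]
    rw [phase_lemma ((mfun cols (k+1)).toNat) (stateAt cols k) spell _ k
      (by rw [stateAt_length]; omega) hzero hval]
    rw [Int.toNat_of_nonneg hnn, decBy_stateAt _ _ hkn,
      ih (k+1) (by omega) fuel (spell ++ List.replicate (mfun cols (k+1)).toNat ((k:Int)+1)),
      List.append_assoc]

theorem spell_eq (cols : List Int) (hm : ∀ s, s ≤ cols.length → 0 ≤ mfun cols s) :
    buildSpell (tailFuel cols cols.length 0) cols [] = tailSpell cols cols.length 0 := by
  have h0 : stateAt cols 0 = cols := by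
    unfold stateAt
    simp only [Finset.range_zero, Finset.sum_empty, sub_zero]
    exact list_eq_map_getD_range cols
  have h := main_lemma cols hm cols.length 0 (by omega) 0 []
  rwa [Nat.zero_add, h0, List.nil_append] at h

-- ===== B-side characterization =====

def mList (cols : List Int) : List Int := (List.range cols.length).map (fun j => mfun cols (j+1))

-- the state of B's sieve after its first k outer iterations
def MB (cols : List Int) (k : Nat) : List Int :=
  (List.range cols.length).map
    (fun j => cols.getD j 0 - ∑ d ∈ Finset.range k, (if (d+1) ∣ (j+1) ∧ d ≠ j then mfun cols (d+1) else 0))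

theorem MB_length (cols : List Int) (k : Nat) : (MB cols k).length = cols.length := by
  simp [MB]

theorem MB_getD (cols : List Int) (k t : Nat) (ht : t < cols.length) :
    (MB cols k).getD t 0
      = cols.getD t 0 - ∑ d ∈ Finset.range k, (if (d+1) ∣ (t+1) ∧ d ≠ t then mfun cols (d+1) else 0) := by
  unfold MB
  rw [PySem.List.getD_map_range _ _ _ _ ht]

theorem MB_getD_self (cols : List Int) (k : Nat) (hk : k < cols.length) :
    (MB cols k).getD k 0 = mfun cols (k+1) := by
  rw [MB_getD _ _ _ hk]
  have hcg : ∀ d ∈ Finset.range k, (if (d+1) ∣ (k+1) ∧ d ≠ k then mfun cols (d+1) else 0)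
      = (if (d+1) ∣ (k+1) then mfun cols (d+1) else 0) := by
    intro d hd
    rw [Finset.mem_range] at hd
    by_cases h : (d+1) ∣ (k+1)
    · rw [if_pos ⟨h, by omega⟩, if_pos h]
    · rw [if_neg (fun hc => h hc.1), if_neg h]
  rw [Finset.sum_congr rfl hcg, sum_ite_divides_proper, ← mfun_succ]

theorem bcond_iff (k t n : Nat) :
    (2*(1+(k:Int)) ≤ (t:Int)+1 ∧ (t:Int)+1 < (n:Int)+1 ∧ (1+(k:Int)) ∣ ((t:Int)+1 - 2*(1+(k:Int))))
      ↔ ((k+1) ∣ (t+1) ∧ k ≠ t ∧ t < n) := by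
  constructor
  · rintro ⟨hb1, hb2, hd⟩
    have hd2 : ((1:Int)+(k:Int)) ∣ ((t:Int)+1) := by
      have h3 : (t:Int)+1 = ((t:Int)+1 - 2*(1+(k:Int))) + (1+(k:Int))*2 := by ring
      rw [h3]
      exact dvd_add hd (dvd_mul_right _ 2)
    have hdn : (k+1) ∣ (t+1) := by
      rw [show ((1:Int)+(k:Int)) = ((k+1 : Nat) : Int) from by push_cast; ring,
        show ((t:Int)+1) = ((t+1 : Nat) : Int) from by push_cast; ring] at hd2
      exact_mod_cast hd2
    exact ⟨hdn, by omega, by omega⟩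
  · rintro ⟨hdn, hne, htn⟩
    obtain ⟨c, hc⟩ := hdn
    have hc2 : 2 ≤ c := by
      rcases c with _ | c
      · omega
      · rcases c with _ | c
        · omega
        · omega
    have h2k : 2*(k+1) ≤ t+1 := by
      calc 2*(k+1) = (k+1)*2 := by ring
        _ ≤ (k+1)*c := Nat.mul_le_mul_left _ hc2
        _ = t+1 := hc.symm
    refine ⟨by omega, by omega, ?_⟩
    have hdz : ((k+1 : Nat) : Int) ∣ ((t+1 : Nat) : Int) := Int.natCast_dvd_natCast.mpr ⟨c, hc⟩
    have h3 : (t:Int)+1 - 2*(1+(k:Int)) = ((t+1 : Nat) : Int) - ((k+1 : Nat) : Int)*2 := by push_cast; ring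
    rw [h3, show ((1:Int)+(k:Int)) = ((k+1 : Nat) : Int) from by push_cast; ring]
    exact dvd_sub hdz (dvd_mul_right _ 2)

theorem foldl_pySetD_sub_shift (v : Int) (L : List Int) (S : List Int)
    (hL : ∀ j ∈ L, 1 ≤ j ∧ (j-1).toNat < S.length) (t : Nat) :
    (L.foldl (fun c j => PySem.List.pySetD c (j-1) (PySem.List.pyGetD c (j-1) 0 - v)) S).getD t 0
      = S.getD t 0 - v * (L.count ((t:Int)+1)) := by
  have h := foldl_pySetD_sub v (L.map (fun x : Int => x - 1)) S
    (by
      intro j hj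
      obtain ⟨j0, hj0, rfl⟩ := List.mem_map.mp hj
      have h0 := hL j0 hj0
      exact ⟨by omega, h0.2⟩) t
  rw [List.foldl_map] at h
  have hcnt : (L.map (fun x : Int => x - 1)).count ((t:Nat) : Int) = L.count ((t:Int)+1) := by
    have hinj : Function.Injective (fun x : Int => x - 1) := by
      intro a b hab
      dsimp at hab
      omega
    have h2 := List.count_map_of_injective L (fun x : Int => x - 1) hinj ((t:Int)+1)
    simpa using h2
  rw [hcnt] at h
  exact h

theorem foldl_pySetD_sub_shift_length (v : Int) (L : List Int) (S : List Int) :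
    (L.foldl (fun c j => PySem.List.pySetD c (j-1) (PySem.List.pyGetD c (j-1) 0 - v)) S).length
      = S.length := by
  have h := foldl_pySetD_sub_length v (L.map (fun x : Int => x - 1)) S
  rw [List.foldl_map] at h
  exact h

theorem bStep (cols : List Int) (k : Nat) (_hk : k < cols.length) :
    (PySem.List.pyRange (2*(1+(k:Int))) ((cols.length:Int)+1) (1+(k:Int))).foldl
      (fun m' j => PySem.List.pySetD m' (j-1) (PySem.List.pyGetD m' (j-1) 0 - mfun cols (k+1)))
      (MB cols k)
    = MB cols (k+1) := by
  have hs : (0:Int) < 1+(k:Int) := by omega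
  have hL : ∀ j ∈ PySem.List.pyRange (2*(1+(k:Int))) ((cols.length:Int)+1) (1+(k:Int)),
      1 ≤ j ∧ (j-1).toNat < (MB cols k).length := by
    intro j hj
    obtain ⟨hb1, hb2, -⟩ := (PySem.List.mem_pyRange_iff_of_pos hs j).mp hj
    rw [MB_length]
    omega
  apply List.ext_getElem (by rw [foldl_pySetD_sub_shift_length, MB_length, MB_length])
  intro t h1 h2
  have ht : t < cols.length := by rwa [MB_length] at h2
  rw [← List.getD_eq_getElem _ 0 h1, ← List.getD_eq_getElem _ 0 h2,
    foldl_pySetD_sub_shift _ _ _ hL t, MB_getD _ _ _ ht, MB_getD _ _ _ ht, Finset.sum_range_succ]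
  rw [count_pyRange_pos _ _ _ hs]
  by_cases hC : (k+1) ∣ (t+1) ∧ k ≠ t ∧ t < cols.length
  · rw [if_pos ((bcond_iff k t cols.length).mpr hC), if_pos ⟨hC.1, hC.2.1⟩]
    push_cast
    ring
  · rw [if_neg (fun hc => hC ((bcond_iff k t cols.length).mp hc)),
      if_neg (fun hc => hC ⟨hc.1, hc.2, ht⟩)]
    push_cast
    ring

theorem MB_zero (cols : List Int) : MB cols 0 = cols := by
  unfold MB
  simp only [Finset.range_zero, Finset.sum_empty, sub_zero]
  exact list_eq_map_getD_range cols

theorem MB_full (cols : List Int) : MB cols cols.length = mList cols := by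
  apply List.ext_getElem (by simp [MB, mList])
  intro j h1 h2
  have hj : j < cols.length := by simpa [mList] using h2
  rw [← List.getD_eq_getElem _ 0 h1, ← List.getD_eq_getElem _ 0 h2, MB_getD _ _ _ hj]
  have hml : (mList cols).getD j 0 = mfun cols (j+1) := by
    unfold mList
    rw [PySem.List.getD_map_range _ _ _ _ hj]
  rw [hml]
  have hmem : j ∈ Finset.range cols.length := Finset.mem_range.mpr hj
  rw [Finset.sum_eq_sum_diff_singleton_add hmem
    (fun d => if (d+1) ∣ (j+1) ∧ d ≠ j then mfun cols (d+1) else 0)]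
  have hfull := Finset.sum_eq_sum_diff_singleton_add hmem
    (fun d => if (d+1) ∣ (j+1) then mfun cols (d+1) else 0)
  have hc : ∑ d ∈ Finset.range cols.length, (if (d+1) ∣ (j+1) then mfun cols (d+1) else 0)
      = cols.getD j 0 := by
    rw [sum_ite_divides_full _ j _ hj, cols_eq_sum_divisors]
  have hcongr : ∑ d ∈ Finset.range cols.length \ {j},
        (if (d+1) ∣ (j+1) ∧ d ≠ j then mfun cols (d+1) else 0)
      = ∑ d ∈ Finset.range cols.length \ {j},
        (if (d+1) ∣ (j+1) then mfun cols (d+1) else 0) := by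
    refine Finset.sum_congr rfl (fun d hd => ?_)
    have hdj : d ≠ j := by
      rw [Finset.mem_sdiff, Finset.mem_singleton] at hd
      exact hd.2
    by_cases h : (d+1) ∣ (j+1)
    · rw [if_pos ⟨h, hdj⟩, if_pos h]
    · rw [if_neg (fun hcc => h hcc.1), if_neg h]
  rw [hcongr]
  have hjj : (if (j+1) ∣ (j+1) ∧ j ≠ j then mfun cols (j+1) else 0) = 0 := by
    rw [if_neg (fun hcc => hcc.2 rfl)]
  have hjj2 : (if (j+1) ∣ (j+1) then mfun cols (j+1) else 0) = mfun cols (j+1) := by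
    rw [if_pos (dvd_refl _)]
  rw [hjj]
  rw [hjj2] at hfull
  linarith [hc, hfull]

theorem pyRange_one_n (n : Nat) : PySem.List.pyRange 1 ((n:Int)+1) 1
    = (List.range n).map (fun t : Nat => 1 + (t:Int)) := by
  rw [PySem.List.pyRange_one, show ((n:Int) + 1 - 1).toNat = n from by omega]

theorem bSieve_eq (cols : List Int) : bSieve cols = mList cols := by
  have hrange := pyRange_one_n cols.length
  unfold bSieve
  rw [hrange, List.foldl_map]
  have hstep : ∀ k, k ≤ cols.length →
      (List.range k).foldl
        (fun (m : List Int) (t : Nat) =>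
          (PySem.List.pyRange (2 * (1+(t:Int))) ((cols.length:Int) + 1) (1+(t:Int))).foldl
            (fun m' j => PySem.List.pySetD m' (j - 1)
              (PySem.List.pyGetD m' (j - 1) 0 - PySem.List.pyGetD m ((1+(t:Int)) - 1) 0)) m)
        cols = MB cols k := by
    intro k
    induction k with
    | zero =>
      intro _
      simp only [List.range_zero, List.foldl_nil]
      exact (MB_zero cols).symm
    | succ k ih =>
      intro hk1
      rw [List.range_succ, List.foldl_append, ih (by omega), List.foldl_cons, List.foldl_nil]
      have e1 : (1:Int) + (k:Int) - 1 = ((k:Nat) : Int) := by ring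
      rw [e1, PySem.List.pyGetD_natCast, MB_getD_self _ _ (by omega)]
      exact bStep cols k (by omega)
  have h := hstep cols.length le_rfl
  rw [MB_full] at h
  exact h

-- ===== counts, products =====

theorem tailSpell_map_sum (cols : List Int) (g : Int → Int) :
    ∀ (q k : Nat), ((tailSpell cols q k).map g).sum
      = ∑ t ∈ Finset.range q, ((mfun cols (k+t+1)).toNat : Int) * g ((k+t+1 : Nat) : Int) := by
  intro q
  induction q with
  | zero => intro k; simp [tailSpell]
  | succ q ih =>
    intro k
    rw [tailSpell, List.map_append, List.sum_append, List.map_replicate, List.sum_replicate,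
      Finset.sum_range_succ', ih (k+1)]
    have hidx : ∀ t : Nat, k+(t+1)+1 = k+1+t+1 := by intro t; omega
    simp only [hidx]
    rw [show ((k:Int)+1) = ((k+0+1 : Nat) : Int) from by push_cast; ring, nsmul_eq_mul]
    ring

theorem tailSpell_prod (cols : List Int) :
    ∀ (q k : Nat), (tailSpell cols q k).prod
      = ∏ t ∈ Finset.range q, ((k+t+1 : Nat) : Int) ^ (mfun cols (k+t+1)).toNat := by
  intro q
  induction q with
  | zero => intro k; simp [tailSpell]
  | succ q ih =>
    intro k
    rw [tailSpell, List.prod_append, List.prod_replicate, Finset.prod_range_succ', ih (k+1)]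
    have hidx : ∀ t : Nat, k+(t+1)+1 = k+1+t+1 := by intro t; omega
    simp only [hidx]
    rw [show ((k:Int)+1) = ((k+0+1 : Nat) : Int) from by push_cast; ring]
    ring

theorem sum_map_range_eq (n : Nat) (f : Nat → Int) :
    ((List.range n).map f).sum = ∑ t ∈ Finset.range n, f t := rfl

theorem prod_map_range_eq (n : Nat) (f : Nat → Int) :
    ((List.range n).map f).prod = ∏ t ∈ Finset.range n, f t := rfl

theorem count_agree (cols : List Int) (hm : ∀ s, s ≤ cols.length → 0 ≤ mfun cols s) (x : Int) :
    aCount (tailSpell cols cols.length 0) x = bCount cols.length (mList cols) x := by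
  unfold aCount bCount
  rw [PySem.List.foldl_add, tailSpell_map_sum cols (fun s => PySem.Int.floordiv x s) cols.length 0,
    pyRange_one_n, List.foldl_map, PySem.List.foldl_add, sum_map_range_eq, zero_add, zero_add]
  refine Finset.sum_congr rfl (fun t ht => ?_)
  rw [Finset.mem_range] at ht
  rw [show (1:Int)+(t:Int)-1 = ((t:Nat):Int) from by ring, PySem.List.pyGetD_natCast]
  unfold mList
  rw [PySem.List.getD_map_range _ _ _ _ ht,
    show (1:Int)+(t:Int) = ((t+1 : Nat) : Int) from by push_cast; ring,
    show (0+t+1 : Nat) = t+1 from by omega,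
    Int.toNat_of_nonneg (hm (t+1) (by omega))]
  ring

theorem exp_agree (cols : List Int) (hm : ∀ s, s ≤ cols.length → 0 ≤ mfun cols s) :
    ∀ (fuel : Nat) (high : Int),
    aExp (tailSpell cols cols.length 0) fuel high = bExp cols.length (mList cols) fuel high := by
  intro fuel
  induction fuel with
  | zero => intro high; rfl
  | succ fuel ih =>
    intro high
    simp only [aExp, bExp, count_agree cols hm]
    split <;> simp [ih]

theorem bin_agree (cols : List Int) (hm : ∀ s, s ≤ cols.length → 0 ≤ mfun cols s) :
    ∀ (fuel : Nat) (low high : Int),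
    aBin (tailSpell cols cols.length 0) fuel low high = bBin cols.length (mList cols) fuel low high := by
  intro fuel
  induction fuel with
  | zero => intro low high; rfl
  | succ fuel ih =>
    intro low high
    simp only [aBin, bBin, count_agree cols hm]
    split
    · split
      · exact ih _ _
      · split <;> exact ih _ _
    · rfl

theorem prod_agree (cols : List Int) (_hm : ∀ s, s ≤ cols.length → 0 ≤ mfun cols s) :
    (tailSpell cols cols.length 0).foldl (fun acc s => acc * s) 1
      = (PySem.List.pyRange 1 ((cols.length : Int) + 1) 1).foldl
          (fun acc s => acc * s ^ (PySem.List.pyGetD (mList cols) (s - 1) 0).toNat) 1 := by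
  have hfold : ∀ (l : List Int), l.foldl (fun acc s => acc * s) 1 = l.prod :=
    fun l => List.prod_eq_foldl.symm
  rw [hfold, tailSpell_prod cols cols.length 0, pyRange_one_n, List.foldl_map]
  have hfold2 : (List.range cols.length).foldl
      (fun (acc : Int) (t : Nat) => acc * (1+(t:Int)) ^ (PySem.List.pyGetD (mList cols) ((1+(t:Int)) - 1) 0).toNat) 1
      = ((List.range cols.length).map
          (fun t : Nat => (1+(t:Int)) ^ (PySem.List.pyGetD (mList cols) ((1+(t:Int)) - 1) 0).toNat)).prod := by
    rw [List.prod_eq_foldl, List.foldl_map]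
  rw [hfold2, prod_map_range_eq]
  refine Finset.prod_congr rfl (fun t ht => ?_)
  rw [Finset.mem_range] at ht
  rw [show (1:Int)+(t:Int)-1 = ((t:Nat):Int) from by ring, PySem.List.pyGetD_natCast]
  unfold mList
  rw [PySem.List.getD_map_range _ _ _ _ ht,
    show (1:Int)+(t:Int) = ((t+1 : Nat) : Int) from by push_cast; ring,
    show (0+t+1 : Nat) = t+1 from by omega]

-- ===== VERDICT (by name: the statement is the Claim_ definition above) =====
theorem solve_spec : Claim_equal_solve := by
  unfold Claim_equal_solve
  intro part data _hdom hpre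
  rcases hpre with ⟨hne, h1, hrest⟩
  cases data with
  | nil => exact absurd rfl hne
  | cons cols rest =>
    unfold Spec_solve solve solve_alt
    simp only [List.headD_cons]
    by_cases hp1 : part = 1
    · simp [hp1]
    · have hm : ∀ s, s ≤ cols.length → 0 ≤ mfun cols s := by
        simpa using (hrest hp1).1
      simp only [if_neg hp1]
      rw [spell_eq _ hm, bSieve_eq]
      by_cases hp2 : part = 2
      · simpa [hp2] using prod_agree _ hm
      · simp only [if_neg hp2]
        rw [exp_agree _ hm, bin_agree _ hm]
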